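-- pv_equiv track=rewrite | github.com/yangyongyongyong/tg2iterm2 | bot_app.py | _looks_like_shell_prompt_line
-- ===== SOURCE A (Python) =====
-- def _looks_like_shell_prompt_line(line: str) -> bool:
--     """判断一行是否像 zsh/bash 的空 prompt。"""
--     stripped = line.replace("\x00", "").replace("\xa0", " ").strip()
--     if stripped in {"%", "$", "#"}:
--         return True
--     if not stripped or stripped[-1] not in {"%", "$", "#"}:
--         return False
--
--     prompt_body = stripped[:-1].rstrip()
--     while prompt_body.startswith("("):
--         close = prompt_body.find(")")
--         if close <= 0:
--             break
--         remainder = prompt_body[close + 1 :]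
--         if remainder == remainder.lstrip():
--             break
--         prompt_body = remainder.lstrip()
--
--     if not prompt_body:
--         return True
--     return any(marker in prompt_body for marker in ("@", "~", "/"))
-- ===== SOURCE B (Python) =====
-- def _looks_like_shell_prompt_line(line: str) -> bool:
--     s = line.replace("\x00", "").replace("\xa0", " ").strip()
--     if s in ("%", "$", "#"):
--         return True
--     if not s or s[-1] not in "%$#":
--         return False
--     body = s[:-1].rstrip()
--     n = len(body)
--     i = 0
--     while i < n and body[i] == "(":
--         j = body.find(")", i)
--         if j < 0:
--             break
--         k = j + 1
--         if k >= n or not body[k].isspace():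
--             break
--         while k < n and body[k].isspace():
--             k += 1
--         i = k
--     rest = body[i:]
--     return not rest or any(c in "@~/" for c in rest)
-- ===== Notes on version B (the rewrite author's own statement) =====
-- stated objective: alternative
-- what changed: The prompt-body loop that repeatedly rebuilds the string (slice, lstrip and find on each new suffix) is replaced by a single cursor-based scan over the fixed body string that advances an index past each leading parenthesized group and its trailing whitespace, and the final three-marker substring search is replaced by one pass over the characters testing each character against the three markers.
import Mathlib
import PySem

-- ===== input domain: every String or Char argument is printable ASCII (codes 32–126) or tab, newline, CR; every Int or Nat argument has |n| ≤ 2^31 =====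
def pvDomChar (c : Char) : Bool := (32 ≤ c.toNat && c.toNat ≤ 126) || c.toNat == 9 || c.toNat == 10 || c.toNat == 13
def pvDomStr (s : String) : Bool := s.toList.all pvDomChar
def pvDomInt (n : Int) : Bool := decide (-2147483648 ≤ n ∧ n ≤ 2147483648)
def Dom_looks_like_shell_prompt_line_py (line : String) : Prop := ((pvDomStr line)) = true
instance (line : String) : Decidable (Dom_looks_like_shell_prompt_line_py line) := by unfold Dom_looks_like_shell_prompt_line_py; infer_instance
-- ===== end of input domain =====

-- B replaces A's string-rebuilding while-loop (slice + lstrip + find on each new suffix) by a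
-- single index-based scan over the fixed body string, and the three-marker substring search by
-- one character-level scan; same return value everywhere (alternative decomposition).

-- ===== PORT A =====

-- A's `while prompt_body.startswith("(")` loop; each iteration rebuilds the string, so the
-- recursion is on the (strictly shrinking) string itself.
def promptLoopA (body : List Char) : List Char :=
  if h1 : PySem.Chars.startswith body ['('] then
    let close := PySem.Chars.find body [')']
    if h2 : close ≤ 0 then body
    else
      let remainder := PySem.List.slice body (some (close + 1)) none
      if _h3 : remainder = PySem.Chars.lstrip remainder then body
      else promptLoopA (PySem.Chars.lstrip remainder)
  else body
termination_by body.length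
decreasing_by
  have hb : body ≠ [] := by
    intro he
    rw [he] at h1
    simp [PySem.Chars.startswith, List.isPrefixOf] at h1
  have hlen : 0 < body.length := List.length_pos_of_ne_nil hb
  have hrem : (PySem.List.slice body (some (PySem.Chars.find body [')'] + 1)) none).length
      ≤ body.length - 1 := by
    rw [PySem.List.slice_from body (a := PySem.Chars.find body [')'] + 1) (by omega)]
    simp only [List.length_drop]
    omega
  have hl := List.length_dropWhile_le PySem.Chars.isspace
    (PySem.List.slice body (some (PySem.Chars.find body [')'] + 1)) none)
  simp only [PySem.Chars.lstrip]
  omega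

-- `stripped[-1]` is guarded by the `not stripped` check, so on the path where it is read the
-- list is nonempty and `getLastD ' '` is exactly Python's stripped[-1].
def looks_like_shell_prompt_line_py (line : String) : Bool :=
  let stripped := PySem.Chars.strip
    (PySem.Chars.replace (PySem.Chars.replace line.toList [Char.ofNat 0] []) [Char.ofNat 160] [' '])
  if stripped = ['%'] ∨ stripped = ['$'] ∨ stripped = ['#'] then true
  else if stripped = [] then false
  else if ¬ (stripped.getLastD ' ' = '%' ∨ stripped.getLastD ' ' = '$' ∨ stripped.getLastD ' ' = '#') then false
  else
    let prompt_body := promptLoopA (PySem.Chars.rstrip (PySem.List.slice stripped none (some (-1))))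
    if prompt_body = [] then true
    else [['@'], ['~'], ['/']].any (fun m => PySem.Chars.isIn m prompt_body)

-- ===== PORT B =====

-- B's inner `while k < n and body[k].isspace(): k += 1`; the fuel (always called with
-- body.length - k, an upper bound on the remaining steps) is only a totality guard.
def skipWS (body : List Char) (k : Nat) : Nat → Nat
  | 0 => k
  | fuel + 1 =>
    if h : k < body.length then
      if PySem.Chars.isspace body[k] then skipWS body (k + 1) fuel else k
    else k

-- B's outer cursor loop; fuel (body.length + 1) is only a totality guard — the cursor strictly
-- increases and never exceeds body.length, so the fuel is never exhausted.
def promptLoopB (body : List Char) (i : Nat) : Nat → Nat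
  | 0 => i
  | fuel + 1 =>
    if h : i < body.length then
      if body[i] = '(' then
        let j := PySem.Chars.findFrom body [')'] (i : Int) none
        if j < 0 then i
        else
          let k := j.toNat + 1
          if hk : k < body.length then
            if PySem.Chars.isspace body[k] then
              promptLoopB body (skipWS body k (body.length - k)) fuel
            else i
          else i
      else i
    else i

def looks_like_shell_prompt_line_py_alt (line : String) : Bool :=
  let s := PySem.Chars.strip
    (PySem.Chars.replace (PySem.Chars.replace line.toList [Char.ofNat 0] []) [Char.ofNat 160] [' '])
  if s = ['%'] ∨ s = ['$'] ∨ s = ['#'] then true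
  else if s = [] then false
  else if ¬ PySem.Chars.isIn [s.getLastD ' '] ['%', '$', '#'] then false
  else
    let body := PySem.Chars.rstrip (PySem.List.slice s none (some (-1)))
    let i := promptLoopB body 0 (body.length + 1)
    let rest := PySem.List.slice body (some (i : Int)) none
    if rest = [] then true
    else rest.any (fun c => PySem.Chars.isIn [c] ['@', '~', '/'])

-- ===== PRECONDITION & SPEC =====
def Spec_looks_like_shell_prompt_line_py (line : String) (out : Bool) : Prop := out = looks_like_shell_prompt_line_py_alt line
instance (line : String) (out : Bool) : Decidable (Spec_looks_like_shell_prompt_line_py line out) := by unfold Spec_looks_like_shell_prompt_line_py; infer_instance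

-- ===== CLAIM (what is proved, stated in full; the proofs are below) =====
def Claim_equal_looks_like_shell_prompt_line_py : Prop := ∀ (line : String), Dom_looks_like_shell_prompt_line_py line → Spec_looks_like_shell_prompt_line_py line (looks_like_shell_prompt_line_py line)

-- ===== LEMMAS AND PROOFS =====

theorem isIn_singleton_iff (c : Char) (l : List Char) :
    PySem.Chars.isIn [c] l = true ↔ c ∈ l := by
  rw [PySem.Chars.isIn_iff_infix]
  constructor
  · rintro ⟨s, t, rfl⟩
    simp
  · intro h
    obtain ⟨s, t, rfl⟩ := List.append_of_mem h
    exact ⟨s, t, by simp⟩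

theorem skipWS_ge (body : List Char) : ∀ (fuel k : Nat), k ≤ skipWS body k fuel := by
  intro fuel
  induction fuel with
  | zero => intro k; simp [skipWS]
  | succ f ihf =>
    intro k
    rw [skipWS]
    split
    · split
      · exact le_trans (by omega) (ihf (k + 1))
      · omega
    · omega

theorem skipWS_le (body : List Char) : ∀ (fuel k : Nat), k ≤ body.length →
    skipWS body k fuel ≤ body.length := by
  intro fuel
  induction fuel with
  | zero => intro k h; simpa [skipWS] using h
  | succ f ihf =>
    intro k h
    rw [skipWS]
    split
    · split
      · exact ihf (k + 1) (by omega)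
      · omega
    · omega

theorem skipWS_drop (body : List Char) : ∀ (fuel k : Nat), body.length - k ≤ fuel →
    body.drop (skipWS body k fuel) = List.dropWhile PySem.Chars.isspace (body.drop k) := by
  intro fuel
  induction fuel with
  | zero =>
    intro k hf
    have he : body.drop k = [] := List.drop_eq_nil_of_le (by omega)
    simp [skipWS, he]
  | succ f ihf =>
    intro k hf
    rw [skipWS]
    by_cases h : k < body.length
    · rw [dif_pos h]
      by_cases hsp : PySem.Chars.isspace (body[k]'h) = true
      · rw [if_pos hsp, ihf (k + 1) (by omega), List.drop_eq_getElem_cons h,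
          List.dropWhile_cons_of_pos hsp]
      · rw [if_neg hsp, List.drop_eq_getElem_cons h, List.dropWhile_cons_of_neg hsp]
    · rw [dif_neg h]
      have he : body.drop k = [] := List.drop_eq_nil_of_le (by omega)
      rw [he, List.dropWhile_nil]

theorem startswith_drop_paren (body : List Char) (i : Nat) (h : i < body.length) :
    PySem.Chars.startswith (body.drop i) ['('] = (body[i] == '(') := by
  rw [Bool.eq_iff_iff, PySem.Chars.startswith_iff, List.drop_eq_getElem_cons h]
  simp only [beq_iff_eq]
  constructor
  · rintro ⟨t, ht⟩
    simp only [List.singleton_append, List.cons.injEq] at ht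
    exact ht.1.symm
  · intro hh
    rw [hh]
    exact ⟨List.drop (i + 1) body, rfl⟩

theorem loopAB (body : List Char) : ∀ (fuel i : Nat), i ≤ body.length → body.length - i < fuel →
    promptLoopA (body.drop i) = body.drop (promptLoopB body i fuel) := by
  intro fuel
  induction fuel with
  | zero => intro i hi hf; omega
  | succ f ih =>
    intro i hi hf
    rw [promptLoopB]
    by_cases hlt : i < body.length
    · rw [dif_pos hlt]
      by_cases hpar : body[i] = '('
      · rw [if_pos hpar]
        have hsw : PySem.Chars.startswith (body.drop i) ['('] = true := by
          rw [startswith_drop_paren body i hlt, hpar]; simp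
        have hff := PySem.Chars.findFrom_natCast body [')'] i (by omega)
        rw [promptLoopA, dif_pos hsw]
        set close := PySem.Chars.find (body.drop i) [')'] with hclose
        have hclose_ge : -1 ≤ close := PySem.Chars.neg_one_le_find _ _
        by_cases hcm : close = -1
        · -- no ')' : both break
          have hj : PySem.Chars.findFrom body [')'] (i : Int) none = -1 := by
            rw [hff, if_pos hcm]
          rw [hj, if_pos (by norm_num), dif_pos (by omega : close ≤ 0)]
        · -- a ')' was found
          have hc0 : 0 ≤ close := by omega
          have hcpos : 0 < close := by
            rcases lt_or_eq_of_le hc0 with h' | h'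
            · exact h'
            · exfalso
              have hspec := PySem.Chars.find_spec (hclose ▸ hc0)
              rw [← hclose, ← h'] at hspec
              simp only [Int.toNat_zero, List.drop_zero] at hspec
              obtain ⟨hpre, -⟩ := hspec
              rw [List.drop_eq_getElem_cons hlt] at hpre
              rcases hpre with ⟨t, ht⟩
              simp only [List.singleton_append] at ht
              have hh : ')' = body[i] := by injection ht
              rw [hpar] at hh
              exact absurd hh (by decide)
          have hclen : close ≤ ((body.drop i).length : Int) := PySem.Chars.find_le_length _ _
          simp only [List.length_drop] at hclen
          have hj : PySem.Chars.findFrom body [')'] (i : Int) none = (i : Int) + close := by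
            rw [hff, if_neg hcm]
          rw [hj, if_neg (by omega), dif_neg (by omega : ¬ close ≤ 0)]
          have hkval : ((i : Int) + close).toNat + 1 = i + close.toNat + 1 := by omega
          simp only [hkval]
          have hrem : PySem.List.slice (body.drop i) (some (close + 1)) none
              = body.drop (i + close.toNat + 1) := by
            rw [PySem.List.slice_from (body.drop i) (a := close + 1) (by omega), List.drop_drop]
            congr 1
            omega
          rw [hrem]
          set k := i + close.toNat + 1 with hk
          by_cases hkl : k < body.length
          · rw [dif_pos hkl]
            have hcons : body.drop k = body[k] :: body.drop (k + 1) :=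
              List.drop_eq_getElem_cons hkl
            by_cases hsp : PySem.Chars.isspace body[k] = true
            · -- whitespace after ')': A strips and loops, B skips and loops
              rw [if_pos hsp]
              have hstrip : PySem.Chars.lstrip (body.drop k)
                  = body.drop (skipWS body k (body.length - k)) := by
                simp only [PySem.Chars.lstrip]
                rw [skipWS_drop body (body.length - k) k (by omega)]
              have hne : ¬ (body.drop k = PySem.Chars.lstrip (body.drop k)) := by
                simp only [PySem.Chars.lstrip]
                rw [hcons, List.dropWhile_cons_of_pos hsp]
                intro he
                have h2 := congrArg List.length he
                have h3 := List.length_dropWhile_le PySem.Chars.isspace (body.drop (k + 1))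
                simp only [List.length_cons, List.length_drop] at h2 h3
                omega
              rw [dif_neg hne, hstrip]
              exact ih (skipWS body k (body.length - k))
                (skipWS_le body (body.length - k) k (by omega))
                (by have := skipWS_ge body (body.length - k) k; omega)
            · -- no whitespace: both break
              rw [if_neg hsp]
              have heq : body.drop k = PySem.Chars.lstrip (body.drop k) := by
                simp only [PySem.Chars.lstrip]
                rw [hcons, List.dropWhile_cons_of_neg hsp]
              rw [dif_pos heq]
          · -- remainder empty: both break
            rw [dif_neg hkl]
            have heq : body.drop k = PySem.Chars.lstrip (body.drop k) := by
              rw [List.drop_eq_nil_of_le (by omega)]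
              simp [PySem.Chars.lstrip]
            rw [dif_pos heq]
      · -- not '(' : both loops end
        rw [if_neg hpar, promptLoopA]
        have hsw : ¬ (PySem.Chars.startswith (body.drop i) ['('] = true) := by
          rw [startswith_drop_paren body i hlt]
          simp [hpar]
        rw [dif_neg hsw]
    · -- i = length : drop i = [], both loops end
      rw [dif_neg hlt, List.drop_eq_nil_of_le (by omega), promptLoopA]
      rw [dif_neg (by simp [PySem.Chars.startswith, List.isPrefixOf])]

theorem markers_eq (pb : List Char) :
    [['@'], ['~'], ['/']].any (fun m => PySem.Chars.isIn m pb)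
      = pb.any (fun c => PySem.Chars.isIn [c] ['@', '~', '/']) := by
  rw [Bool.eq_iff_iff]
  simp only [List.any_eq_true, List.mem_cons]
  constructor
  · rintro ⟨m, hm, hin⟩
    rcases hm with rfl | rfl | rfl | h
    · exact ⟨'@', (isIn_singleton_iff _ _).mp hin, by rw [isIn_singleton_iff]; simp⟩
    · exact ⟨'~', (isIn_singleton_iff _ _).mp hin, by rw [isIn_singleton_iff]; simp⟩
    · exact ⟨'/', (isIn_singleton_iff _ _).mp hin, by rw [isIn_singleton_iff]; simp⟩
    · simp at h
  · rintro ⟨c, hc, hin⟩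
    rw [isIn_singleton_iff] at hin
    fin_cases hin
    · exact ⟨['@'], by simp, (isIn_singleton_iff _ _).mpr hc⟩
    · exact ⟨['~'], by simp, (isIn_singleton_iff _ _).mpr hc⟩
    · exact ⟨['/'], by simp, (isIn_singleton_iff _ _).mpr hc⟩

-- ===== VERDICT (by name: the statement is the Claim_ definition above) =====
theorem looks_like_shell_prompt_line_py_spec : Claim_equal_looks_like_shell_prompt_line_py := by
  intro line _
  unfold Spec_looks_like_shell_prompt_line_py
  simp only [looks_like_shell_prompt_line_py, looks_like_shell_prompt_line_py_alt]
  set s := PySem.Chars.strip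
    (PySem.Chars.replace (PySem.Chars.replace line.toList [Char.ofNat 0] []) [Char.ofNat 160] [' ']) with hs
  by_cases h1 : s = ['%'] ∨ s = ['$'] ∨ s = ['#']
  · rw [if_pos h1, if_pos h1]
  · rw [if_neg h1, if_neg h1]
    by_cases h2 : s = []
    · rw [if_pos h2, if_pos h2]
    · rw [if_neg h2, if_neg h2]
      by_cases h3 : s.getLastD ' ' = '%' ∨ s.getLastD ' ' = '$' ∨ s.getLastD ' ' = '#'
      · have h3' : PySem.Chars.isIn [s.getLastD ' '] ['%', '$', '#'] = true := by
          rw [isIn_singleton_iff]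
          simpa using h3
        rw [if_neg (not_not_intro h3), if_neg (not_not_intro h3')]
        set body := PySem.Chars.rstrip (PySem.List.slice s none (some (-1))) with hb
        have hloop : promptLoopA body = body.drop (promptLoopB body 0 (body.length + 1)) := by
          simpa using loopAB body (body.length + 1) 0 (by omega) (by omega)
        have hrest : PySem.List.slice body
            (some ((promptLoopB body 0 (body.length + 1) : Nat) : Int)) none
            = body.drop (promptLoopB body 0 (body.length + 1)) := by
          rw [PySem.List.slice_from_natCast]
        rw [hrest, ← hloop, markers_eq]
      · have h3' : ¬ (PySem.Chars.isIn [s.getLastD ' '] ['%', '$', '#'] = true) := by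
          rw [isIn_singleton_iff]
          simpa using h3
        rw [if_pos h3, if_pos h3']
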